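-- pv_equiv track=rewrite | github.com/JeroenWeener/Libertas | sigma_client.py | _s_k_p1
-- ===== SOURCE A (Python) =====
-- from typing import List, Set
--
-- def _s_k_p1(
--
--         w: str,
-- ) -> Set[str]:
--     """Generates the S_K^(p1) set for a keyword.
--     Set items are of the form '{occurrence}:{character distance}:{character 1},{character 2}'.
--
--     :param w: The keyword for which the set is to be generated
--     :type w: str
--     :returns: The S_K^(p1) set of the keyword
--     :rtype: Set[str]
--     """
--     pairs = [str(c2 - c1) + ':' + w[c1] + ',' + w[c2] for c1 in range(len(w)) for c2 in range(c1 + 1, len(w))]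
--     unique_pairs = list(set(pairs))
--     pair_count_dict = {pair: pairs.count(pair) for pair in unique_pairs}
--     return set([str(count + 1) + ':' + pair for pair in pair_count_dict.keys() for count in
--                 range(pair_count_dict[pair])])
-- ===== SOURCE B (Python) =====
-- def _s_k_p1(w):
--     n = len(w)
--     result = set()
--     for c1 in range(n):
--         for c2 in range(c1 + 1, n):
--             d = c2 - c1
--             if any(w[i] == w[c1] and w[i + d] == w[c2] for i in range(c1)):
--                 continue  # an earlier starting position yields this very pair: not its first occurrence
--             m = sum(1 for i in range(n - d) if w[i] == w[c1] and w[i + d] == w[c2])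
--             pair = str(d) + ':' + w[c1] + ',' + w[c2]
--             result.update(str(k) + ':' + pair for k in range(1, m + 1))
--     return result
-- ===== Notes on version B (the rewrite author's own statement) =====
-- stated objective: faster
-- what changed: B drops A's four staged passes (pairs list, list(set(...)), pairs.count dict comprehension, expansion pass) and their containers entirely: one nested index scan that, at the first occurrence of each character pattern, counts that pattern's positions directly and emits its numbered items immediately.
import Mathlib
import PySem

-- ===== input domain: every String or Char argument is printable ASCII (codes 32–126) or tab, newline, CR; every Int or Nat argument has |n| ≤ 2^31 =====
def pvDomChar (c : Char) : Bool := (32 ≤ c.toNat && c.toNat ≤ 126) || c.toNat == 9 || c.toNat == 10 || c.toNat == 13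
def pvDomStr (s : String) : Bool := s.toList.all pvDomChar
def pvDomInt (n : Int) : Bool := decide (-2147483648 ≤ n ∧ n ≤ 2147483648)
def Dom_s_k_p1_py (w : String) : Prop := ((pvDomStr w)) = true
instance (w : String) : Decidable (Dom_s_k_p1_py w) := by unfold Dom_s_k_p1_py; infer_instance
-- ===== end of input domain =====

-- B replaces A's four staged passes (materialise the pairs list, list(set(...)), a quadratic
-- pairs.count dict, then an expansion pass) by a direct scan over index pairs with no auxiliary
-- containers: at the first occurrence of each character pattern it counts that pattern's positions
-- once and emits all its numbered items at once (alternative decomposition, no repeated list.count).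

-- shared port helper: the pair string str(c2-c1)+':'+w[c1]+','+w[c2] (indices always in range; default char unreachable)
def pvDistPair (cs : List Char) (c1 c2 : Int) : String :=
  PySem.Int.toStr (c2 - c1) ++ ":" ++ String.ofList [PySem.List.pyGetD cs c1 ' '] ++ "," ++ String.ofList [PySem.List.pyGetD cs c2 ' ']

-- ===== PORT A =====
def s_k_p1_py (w : String) : List String :=
  let cs := w.toList
  let n := PySem.Str.len w
  let pairs := (PySem.List.pyRange 0 n 1).flatMap (fun c1 =>
    (PySem.List.pyRange (c1 + 1) n 1).map (fun c2 => pvDistPair cs c1 c2))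
  let uniquePairs : PySem.Set String := PySem.Set.ofList pairs
  let pairCountDict := uniquePairs.foldl
    (fun d p => d.insert p ((PySem.List.count pairs p : Int))) PySem.Dict.empty
  PySem.Set.ofList (pairCountDict.keys.flatMap (fun p =>
    (PySem.List.pyRange 0 (pairCountDict.getD p 0) 1).map
      (fun c => PySem.Int.toStr (c + 1) ++ ":" ++ p)))

-- ===== PORT B =====
def s_k_p1_py_alt (w : String) : List String :=
  let cs := w.toList
  let n := PySem.Str.len w
  (PySem.List.pyRange 0 n 1).foldl (fun result c1 =>
    (PySem.List.pyRange (c1 + 1) n 1).foldl (fun result c2 =>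
      let d := c2 - c1
      if (PySem.List.pyRange 0 c1 1).any (fun i =>
            PySem.List.pyGetD cs i ' ' == PySem.List.pyGetD cs c1 ' ' &&
            PySem.List.pyGetD cs (i + d) ' ' == PySem.List.pyGetD cs c2 ' ') then
        result   -- continue: an earlier start position yields this very pair
      else
        let m := (PySem.List.pyRange 0 (n - d) 1).foldl (fun acc i =>
          if PySem.List.pyGetD cs i ' ' == PySem.List.pyGetD cs c1 ' ' &&
             PySem.List.pyGetD cs (i + d) ' ' == PySem.List.pyGetD cs c2 ' ' then acc + 1 else acc) 0
        let pair := pvDistPair cs c1 c2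
        (PySem.List.pyRange 1 (m + 1) 1).foldl
          (fun r k => PySem.Set.add r (PySem.Int.toStr k ++ ":" ++ pair)) result) result)
    PySem.Set.empty

-- ===== PRECONDITION & SPEC =====
def Spec_s_k_p1_py (w : String) (out : List String) : Prop := out = s_k_p1_py_alt w
instance (w : String) (out : List String) : Decidable (Spec_s_k_p1_py w out) := by unfold Spec_s_k_p1_py; infer_instance

-- ===== CLAIM (what is proved, stated in full; the proofs are below) =====
def Claim_equal_s_k_p1_py : Prop := ∀ (w : String), Dom_s_k_p1_py w → Spec_s_k_p1_py w (s_k_p1_py w)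

-- ===== LEMMAS AND PROOFS =====

-- proof-side views: the lexicographic position list, the triple at a position, its pair string
def pvPositions (n : Int) : List (Int × Int) :=
  (PySem.List.pyRange 0 n 1).flatMap (fun c1 =>
    (PySem.List.pyRange (c1 + 1) n 1).map (fun c2 => (c1, c2)))

def pvTriple (cs : List Char) (x : Int × Int) : Int × Char × Char :=
  (x.2 - x.1, PySem.List.pyGetD cs x.1 ' ', PySem.List.pyGetD cs x.2 ' ')

def pvEnc (t : Int × Char × Char) : String :=
  PySem.Int.toStr t.1 ++ ":" ++ String.ofList [t.2.1] ++ "," ++ String.ofList [t.2.2]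

-- first-occurrence emission over a key list, carrying the keys already seen
def pvEmitAux {κ : Type} [BEq κ] (H : κ → List String) : List κ → List κ → List String
  | [], _ => []
  | k :: ks, seen => (if seen.contains k then [] else H k) ++ pvEmitAux H ks (seen ++ [k])

-- range(1, m+1) is range(m) shifted by one
lemma pvRange_shift (m : Nat) :
    PySem.List.pyRange 1 ((m : Int) + 1) 1 = (PySem.List.pyRange 0 (m : Int) 1).map (· + 1) := by
  induction m with
  | zero => rfl
  | succ k ih =>
      have h1 : (1 : Int) ≤ (k : Int) + 1 := by omega
      have h0 : (0 : Int) ≤ (k : Int) := by omega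
      have e1 : ((k + 1 : Nat) : Int) + 1 = ((k : Int) + 1) + 1 := by push_cast; ring
      have e2 : ((k + 1 : Nat) : Int) = (k : Int) + 1 := by push_cast; ring
      rw [e1, e2, PySem.List.pyRange_one_succ_right h1, PySem.List.pyRange_one_succ_right h0,
        List.map_append, ih]
      simp

-- the two expansions of one counted pair coincide
lemma pvExpand_eq (p : String) (m : Nat) :
    (PySem.List.pyRange 1 ((m : Int) + 1) 1).map (fun k => PySem.Int.toStr k ++ ":" ++ p)
      = (PySem.List.pyRange 0 ((m : Int)) 1).map (fun c => PySem.Int.toStr (c + 1) ++ ":" ++ p) := by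
  rw [pvRange_shift, List.map_map]
  rfl

-- A's count dict IS Counter(pairs)
lemma pvDictA_eq_counter (pairs : List String) :
    (PySem.Set.ofList pairs).foldl
        (fun d p => d.insert p ((PySem.List.count pairs p : Int))) PySem.Dict.empty
      = PySem.Dict.counter pairs := by
  apply PySem.Dict.ext
  rw [PySem.Dict.items_foldl_insert_fresh (PySem.Set.ofList pairs) (fun p => p)
        (fun p => ((PySem.List.count pairs p : Int))) PySem.Dict.empty
        (by intro a _; simp [PySem.Dict.contains_empty])
        (by simp [PySem.Set.nodup_ofList]),
      PySem.Dict.items_counter]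
  simp [PySem.List.count_eq, PySem.Dict.empty]

-- digitChar is injective below 10
lemma pvDigitChar_inj {m n : Nat} (hm : m < 10) (hn : n < 10)
    (h : Nat.digitChar m = Nat.digitChar n) : m = n := by
  interval_cases m <;> interval_cases n <;> simp_all [Nat.digitChar]

-- base-10 toDigits is injective
lemma pvToDigits_inj : ∀ m n : Nat, Nat.toDigits 10 m = Nat.toDigits 10 n → m = n := by
  intro m
  induction m using Nat.strong_induction_on with
  | _ m ih =>
    intro n h
    by_cases hm : m < 10
    · by_cases hn : n < 10
      · rw [Nat.toDigits_of_lt_base hm, Nat.toDigits_of_lt_base hn] at h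
        exact pvDigitChar_inj hm hn (List.singleton_injective h)
      · rw [Nat.toDigits_of_lt_base hm, Nat.toDigits_of_base_le (by norm_num) (by omega)] at h
        have hl := congrArg List.length h
        simp only [List.length_append, List.length_cons, List.length_nil] at hl
        have hp := Nat.length_toDigits_pos (b := 10) (n := n / 10)
        omega
    · by_cases hn : n < 10
      · rw [Nat.toDigits_of_lt_base hn, Nat.toDigits_of_base_le (by norm_num) (by omega)] at h
        have hl := congrArg List.length h
        simp only [List.length_append, List.length_cons, List.length_nil] at hl
        have hp := Nat.length_toDigits_pos (b := 10) (n := m / 10)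
        omega
      · rw [Nat.toDigits_of_base_le (by norm_num) (by omega),
            Nat.toDigits_of_base_le (by norm_num) (by omega : (10:Nat) ≤ n)] at h
        have h2 := List.append_inj h (by
          have := congrArg List.length h
          simp at this
          omega)
        have hq : m / 10 = n / 10 := ih (m / 10) (by omega) (n / 10) h2.1
        have hr : m % 10 = n % 10 := by
          have := h2.2
          simp at this
          exact pvDigitChar_inj (by omega) (by omega) this
        omega

-- str(d) is injective on positive ints
lemma pvToStr_inj {a b : Int} (ha : 1 ≤ a) (hb : 1 ≤ b)
    (h : PySem.Int.toStr a = PySem.Int.toStr b) : a = b := by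
  unfold PySem.Int.toStr PySem.Int.toChars at h
  rw [if_neg (by omega), if_neg (by omega)] at h
  have h2 : Nat.toDigits 10 a.toNat = Nat.toDigits 10 b.toNat := by
    have := congrArg String.toList h
    simpa using this
  have := pvToDigits_inj _ _ h2
  omega

-- splitting an append at a character absent from both prefixes
lemma pvColonSplit : ∀ (u u' v v' : List Char), ':' ∉ u → ':' ∉ u' →
    u ++ ':' :: v = u' ++ ':' :: v' → u = u' ∧ v = v' := by
  intro u
  induction u with
  | nil =>
    intro u' v v' _ hu' h
    cases u' with
    | nil => simpa using h
    | cons c cs =>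
      simp at h
      exact absurd (h.1 ▸ List.mem_cons_self) hu'
  | cons c cs ih =>
    intro u' v v' hu hu' h
    cases u' with
    | nil =>
      simp at h
      exact absurd (h.1 ▸ List.mem_cons_self) hu
    | cons c' cs' =>
      simp at h
      obtain ⟨rfl, h2⟩ := h
      have := ih cs' v v' (by simp_all) (by simp_all) h2
      simp_all

-- str(d) of a positive d has no colon
lemma pvNoColon {d : Int} (hd : 1 ≤ d) : ':' ∉ PySem.Int.toChars d := by
  intro hmem
  unfold PySem.Int.toChars at hmem
  rw [if_neg (by omega)] at hmem
  have := Nat.isDigit_of_mem_toDigits (by norm_num) (by norm_num) hmem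
  simp [Char.isDigit] at this

-- the pair string determines the triple (for positive distances)
lemma pvEnc_inj {t t' : Int × Char × Char} (ht : 1 ≤ t.1) (ht' : 1 ≤ t'.1)
    (h : pvEnc t = pvEnc t') : t = t' := by
  obtain ⟨d, a, b⟩ := t
  obtain ⟨d', a', b'⟩ := t'
  have hl := congrArg String.toList h
  simp only [pvEnc, String.toList_append, PySem.Int.toList_toStr] at hl
  have hl2 : PySem.Int.toChars d ++ ':' :: (a :: ',' :: [b])
      = PySem.Int.toChars d' ++ ':' :: (a' :: ',' :: [b']) := by
    simpa using hl
  obtain ⟨h1, h2⟩ := pvColonSplit _ _ _ _ (pvNoColon ht) (pvNoColon ht') hl2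
  simp at h2
  have hd : d = d' := pvToStr_inj ht ht' (by
    unfold PySem.Int.toStr; rw [h1])
  simp_all

-- a loop of set-updates is one update by the concatenation
lemma pvFoldUpdate {α : Type} (l : List α) (g : α → List String) :
    ∀ (s : PySem.Set String), l.foldl (fun s x => PySem.Set.update s (g x)) s
      = PySem.Set.update s (l.flatMap g) := by
  induction l with
  | nil => intro s; simp [PySem.Set.update_nil]
  | cons x xs ih =>
      intro s
      simp only [List.foldl_cons, List.flatMap_cons]
      rw [ih, PySem.Set.update_append]

-- set(map f xs) = map f (set(xs)) for f injective on xs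
lemma pvOfList_map {α β : Type} [BEq α] [LawfulBEq α] [BEq β] [LawfulBEq β] (f : α → β) :
    ∀ (l : List α), (∀ x ∈ l, ∀ y ∈ l, f x = f y → x = y) →
      PySem.Set.ofList (l.map f) = (PySem.Set.ofList l).map f := by
  intro l
  induction l with
  | nil => intro _; rfl
  | cons x xs ih =>
      intro hinj
      simp only [List.map_cons, PySem.Set.ofList_cons]
      rw [ih (fun a ha b hb => hinj a (by simp [ha]) b (by simp [hb]))]
      simp only [PySem.Set.discard, List.filter_map]
      congr 1
      refine congrArg (List.map f) (List.filter_congr ?_)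
      intro y hy
      have hy' : y ∈ xs := (PySem.Set.mem_ofList xs y).mp hy
      simp only [Function.comp]
      by_cases hxy : y = x
      · subst hxy; simp
      · have : ¬ (f y = f x) := fun hf => hxy (hinj y (by simp [hy']) x (by simp) hf)
        simp [hxy, this]

-- counting an image element under an injective-on-l map
lemma pvCount_map {α β : Type} [BEq α] [LawfulBEq α] [BEq β] [LawfulBEq β] (f : α → β) (l : List α) (x : α)
    (hinj : ∀ a ∈ l, ∀ b ∈ l, f a = f b → a = b) (hx : x ∈ l) :
    (l.map f).count (f x) = l.count x := by
  rw [List.count_eq_countP, List.count_eq_countP, List.countP_map]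
  apply List.countP_congr
  intro a ha
  simp only [Function.comp]
  constructor
  · intro h
    simp at h ⊢
    exact hinj a ha x hx h
  · intro h
    simp at h ⊢
    rw [h]

-- closed form of the first-occurrence emission
lemma pvEmitAux_eq {κ : Type} [BEq κ] [LawfulBEq κ] (H : κ → List String) :
    ∀ (ks seen : List κ), pvEmitAux H ks seen
      = ((PySem.Set.ofList ks).filter (fun k => !(seen.contains k))).flatMap H := by
  intro ks
  induction ks with
  | nil => intro seen; rfl
  | cons k ks ih =>
      intro seen
      simp only [pvEmitAux, PySem.Set.ofList_cons]
      rw [ih, List.filter_cons]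
      -- align the two guards
      simp only [PySem.Set.discard, List.filter_filter]
      have hfe : List.filter (fun y => !((seen ++ [k]).contains y)) (PySem.Set.ofList ks)
          = List.filter (fun a => !(seen.contains a) && !(a == k)) (PySem.Set.ofList ks) := by
        apply List.filter_congr
        intro y _
        by_cases hyk : y = k
        · subst hyk; simp
        · simp [hyk]
      rw [hfe]
      by_cases hk : k ∈ seen
      · rw [if_pos (by simpa using hk : seen.contains k = true)]
        have hc : (!(seen.contains k)) = false := by simp [hk]
        rw [hc]
        simp
      · rw [if_neg (by simp [hk] : ¬ seen.contains k = true)]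
        have hc : (!(seen.contains k)) = true := by simp [hk]
        rw [hc]
        simp

-- a flatMap whose guard is 'key already seen in the prefix' is the first-occurrence emission
lemma pvFlatMap_firstOcc {α κ : Type} [BEq κ] [LawfulBEq κ] (key : α → κ) (cond : α → Bool)
    (H : κ → List String) (full : List α)
    (hc : ∀ pre x post, full = pre ++ x :: post → (cond x = true ↔ key x ∈ pre.map key)) :
    ∀ (rest pre : List α), full = pre ++ rest →
      rest.flatMap (fun x => if cond x then [] else H (key x))
        = pvEmitAux H (rest.map key) (pre.map key) := by
  intro rest
  induction rest with
  | nil => intro pre _; rfl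
  | cons x rest ih =>
      intro pre hfull
      simp only [List.flatMap_cons, List.map_cons, pvEmitAux]
      have hcx := hc pre x rest (by rw [hfull])
      have e1 : (if cond x then ([] : List String) else H (key x))
          = (if (pre.map key).contains (key x) then [] else H (key x)) := by
        by_cases hmem : key x ∈ pre.map key
        · rw [if_pos (hcx.mpr hmem), if_pos (by simpa using hmem)]
        · rw [if_neg (fun hcc => hmem (hcx.mp hcc)), if_neg (by simpa using hmem)]
      rw [e1]
      have := ih (pre ++ [x]) (by rw [hfull]; simp)
      rw [this]
      simp

-- pairwise order propagates through flatMap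
lemma pvPairwise_flatMap {α β : Type} (R : β → β → Prop) (l : List α) (g : α → List β)
    (h1 : ∀ a ∈ l, (g a).Pairwise R)
    (h2 : l.Pairwise (fun a b => ∀ x ∈ g a, ∀ y ∈ g b, R x y)) :
    (l.flatMap g).Pairwise R := by
  induction l with
  | nil => simp
  | cons a l ih =>
      simp only [List.flatMap_cons]
      rw [List.pairwise_append]
      refine ⟨h1 a (by simp), ih (fun b hb => h1 b (by simp [hb])) (List.Pairwise.of_cons h2), ?_⟩
      intro x hx y hy
      rw [List.mem_flatMap] at hy
      obtain ⟨b, hb, hyb⟩ := hy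
      exact (List.rel_of_pairwise_cons h2 hb) x hx y hyb

-- membership in the position list
lemma pvMem_positions {n : Int} {x : Int × Int} :
    x ∈ pvPositions n ↔ 0 ≤ x.1 ∧ x.1 < x.2 ∧ x.2 < n := by
  obtain ⟨c1, c2⟩ := x
  simp only [pvPositions, List.mem_flatMap, List.mem_map, PySem.List.mem_pyRange_one]
  constructor
  · rintro ⟨a, ha, b, hb, heq⟩
    cases heq
    exact ⟨ha.1, by omega, hb.2⟩
  · rintro ⟨h0, h12, h2n⟩
    exact ⟨c1, ⟨h0, by omega⟩, c2, ⟨by omega, h2n⟩, rfl⟩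

-- the position list is lexicographically strictly ordered
lemma pvPairwise_positions (n : Int) :
    (pvPositions n).Pairwise (fun x y => x.1 < y.1 ∨ (x.1 = y.1 ∧ x.2 < y.2)) := by
  apply pvPairwise_flatMap
  · intro a _
    apply List.Pairwise.map
    · intro b c hbc
      exact Or.inr ⟨rfl, hbc⟩
    · exact PySem.List.pairwise_lt_pyRange_one _ _
  · apply List.Pairwise.imp ?_ (PySem.List.pairwise_lt_pyRange_one 0 n)
    intro a b hab x hx y hy
    simp only [List.mem_map] at hx hy
    obtain ⟨_, _, rfl⟩ := hx
    obtain ⟨_, _, rfl⟩ := hy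
    exact Or.inl hab

-- uniqueness-based count: a predicate that can only hold at v
lemma pvCountP_unique {l : List Int} (p : Int → Bool) (v : Int) (hnd : l.Nodup)
    (hv : ∀ x ∈ l, p x = true → x = v) :
    l.countP p = if (v ∈ l ∧ p v = true) then 1 else 0 := by
  induction l with
  | nil => simp
  | cons a l ih =>
      rw [List.countP_cons]
      by_cases hpa : p a = true
      · have hav : a = v := hv a (by simp) hpa
        subst hav
        have hnl : a ∉ l := (List.nodup_cons.mp hnd).1
        have : l.countP p = 0 := List.countP_eq_zero.mpr (fun x hx hpx =>
          hnl ((hv x (by simp [hx]) hpx) ▸ hx))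
        simp [this, hpa]
      · have hrec := ih (List.nodup_cons.mp hnd).2 (fun x hx hpx => hv x (by simp [hx]) hpx)
        rw [hrec]
        by_cases hva : v = a
        · subst hva; simp [hpa]
        · simp [hpa, List.mem_cons, hva]

-- sum of 0/1 indicators is a count
lemma pvSum_ite {α : Type} (l : List α) (q : α → Prop) [DecidablePred q] :
    (l.map (fun x => if q x then (1 : Nat) else 0)).sum = l.countP (fun x => decide (q x)) := by
  induction l with
  | nil => rfl
  | cons a l ih =>
      simp only [List.map_cons, List.sum_cons, List.countP_cons, ih]
      by_cases h : q a <;> simp [h] <;> omega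

-- B's per-pattern count is the multiset multiplicity of the triple
lemma pvM_eq (cs : List Char) (n c1 c2 : Int) (h0 : 0 ≤ c1) (h12 : c1 < c2) (h2n : c2 < n) :
    ((pvPositions n).map (pvTriple cs)).count (pvTriple cs (c1, c2))
      = (PySem.List.pyRange 0 (n - (c2 - c1)) 1).countP (fun i =>
          PySem.List.pyGetD cs i ' ' == PySem.List.pyGetD cs c1 ' ' &&
          PySem.List.pyGetD cs (i + (c2 - c1)) ' ' == PySem.List.pyGetD cs c2 ' ') := by
  rw [List.count_eq_countP, List.countP_map, pvPositions, List.countP_flatMap]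
  have hinner : ∀ a ∈ PySem.List.pyRange 0 n 1,
      (List.countP ((fun x => x == pvTriple cs (c1, c2)) ∘ pvTriple cs)
        ((PySem.List.pyRange (a + 1) n 1).map (fun c2' => (a, c2'))))
      = if ((a + (c2 - c1) ∈ PySem.List.pyRange (a + 1) n 1) ∧
            (pvTriple cs (a, a + (c2 - c1)) == pvTriple cs (c1, c2)) = true) then 1 else 0 := by
    intro a _
    rw [List.countP_map,
        pvCountP_unique _ (a + (c2 - c1)) (PySem.List.nodup_pyRange_one _ _)
          (by intro x _ hx
              simp only [Function.comp_apply, beq_iff_eq, pvTriple, Prod.mk.injEq] at hx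
              omega)]
    simp only [Function.comp_apply]
    exact if_congr Iff.rfl rfl rfl
  calc (List.map (List.countP ((fun x => x == pvTriple cs (c1, c2)) ∘ pvTriple cs) ∘
          fun c1' => (PySem.List.pyRange (c1' + 1) n 1).map (fun c2' => (c1', c2')))
          (PySem.List.pyRange 0 n 1)).sum
      = (List.map (fun a => if ((a + (c2 - c1) ∈ PySem.List.pyRange (a + 1) n 1) ∧
            (pvTriple cs (a, a + (c2 - c1)) == pvTriple cs (c1, c2)) = true) then 1 else 0)
          (PySem.List.pyRange 0 n 1)).sum := by
        exact congrArg List.sum (List.map_congr_left hinner)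
    _ = (PySem.List.pyRange 0 n 1).countP (fun a => decide ((a + (c2 - c1) ∈ PySem.List.pyRange (a + 1) n 1) ∧
            (pvTriple cs (a, a + (c2 - c1)) == pvTriple cs (c1, c2)) = true)) := pvSum_ite _ _
    _ = (PySem.List.pyRange 0 (n - (c2 - c1)) 1).countP (fun i =>
          PySem.List.pyGetD cs i ' ' == PySem.List.pyGetD cs c1 ' ' &&
          PySem.List.pyGetD cs (i + (c2 - c1)) ' ' == PySem.List.pyGetD cs c2 ' ') := by
        rw [PySem.List.pyRange_one_append 0 (n - (c2 - c1)) n (by omega) (by omega),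
          List.countP_append]
        have hz : (PySem.List.pyRange (n - (c2 - c1)) n 1).countP (fun a =>
            decide ((a + (c2 - c1) ∈ PySem.List.pyRange (a + 1) n 1) ∧
            (pvTriple cs (a, a + (c2 - c1)) == pvTriple cs (c1, c2)) = true)) = 0 := by
          rw [List.countP_eq_zero]
          intro a ha
          rw [PySem.List.mem_pyRange_one] at ha
          simp only [decide_eq_true_eq, PySem.List.mem_pyRange_one, not_and]
          intro hmem
          omega
        rw [hz, Nat.add_zero]
        apply List.countP_congr
        intro a ha
        rw [PySem.List.mem_pyRange_one] at ha
        simp only [decide_eq_true_eq, PySem.List.mem_pyRange_one, Bool.and_eq_true, beq_iff_eq,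
          pvTriple, Prod.mk.injEq]
        constructor
        · intro h
          exact ⟨h.2.2.1, h.2.2.2⟩
        · intro h
          exact ⟨⟨by omega, by omega⟩, by omega, h.1, h.2⟩

-- the guard of B is exactly 'this triple already occurred in the prefix'
lemma pvCond_iff (cs : List Char) (n : Int) :
    ∀ pre x post, pvPositions n = pre ++ x :: post →
      (((PySem.List.pyRange 0 x.1 1).any (fun i =>
            PySem.List.pyGetD cs i ' ' == PySem.List.pyGetD cs x.1 ' ' &&
            PySem.List.pyGetD cs (i + (x.2 - x.1)) ' ' == PySem.List.pyGetD cs x.2 ' ')) = true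
        ↔ pvTriple cs x ∈ pre.map (pvTriple cs)) := by
  intro pre x post hsplit
  obtain ⟨c1, c2⟩ := x
  have hx : ((c1, c2) : Int × Int) ∈ pvPositions n := by rw [hsplit]; simp
  have hb := pvMem_positions.mp hx
  simp only at hb
  have hpair := pvPairwise_positions n
  rw [hsplit, List.pairwise_append] at hpair
  obtain ⟨hpre, hrest, hcross⟩ := hpair
  have hmem_pre : ∀ y : Int × Int, y ∈ pvPositions n →
      (y.1 < c1 ∨ (y.1 = c1 ∧ y.2 < c2)) → y ∈ pre := by
    intro y hy hlex
    rw [hsplit] at hy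
    rcases List.mem_append.mp hy with h | h
    · exact h
    · rcases List.mem_cons.mp h with h1 | h2
      · subst h1; simp at hlex
      · have := (List.pairwise_cons.mp hrest).1 y h2
        simp only at this
        omega
  constructor
  · intro hany
    rw [List.any_eq_true] at hany
    obtain ⟨i, hi, hchars⟩ := hany
    rw [PySem.List.mem_pyRange_one] at hi
    simp only [Bool.and_eq_true, beq_iff_eq] at hchars
    have hyP : ((i, i + (c2 - c1)) : Int × Int) ∈ pvPositions n :=
      pvMem_positions.mpr (by constructor; omega; constructor; omega; simp; omega)
    have hypre : ((i, i + (c2 - c1)) : Int × Int) ∈ pre :=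
      hmem_pre _ hyP (by left; simpa using hi.2)
    rw [List.mem_map]
    refine ⟨_, hypre, ?_⟩
    simp only [pvTriple, Prod.mk.injEq]
    exact ⟨by ring, hchars.1, hchars.2⟩
  · intro hmemmap
    rw [List.mem_map] at hmemmap
    obtain ⟨y, hypre, hty⟩ := hmemmap
    have hyP : y ∈ pvPositions n := by
      rw [hsplit]; exact List.mem_append.mpr (Or.inl hypre)
    have hyb := pvMem_positions.mp hyP
    have hylex := hcross y hypre (c1, c2) (by simp)
    simp only [pvTriple, Prod.mk.injEq] at hty
    obtain ⟨hd, hca, hcb⟩ := hty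
    have hy1 : y.1 < c1 := by
      rcases hylex with h | h
      · exact h
      · omega
    rw [List.any_eq_true]
    refine ⟨y.1, ?_, ?_⟩
    · rw [PySem.List.mem_pyRange_one]; omega
    · simp only [Bool.and_eq_true, beq_iff_eq]
      refine ⟨hca, ?_⟩
      have he : y.1 + (c2 - c1) = y.2 := by omega
      rw [he]; exact hcb

-- the shared normal form of both sides
set_option maxHeartbeats 2000000 in
theorem s_k_p1_py_spec : Claim_equal_s_k_p1_py := by
  intro w _
  unfold Spec_s_k_p1_py
  have hTpos : ∀ t ∈ (pvPositions (PySem.Str.len w)).map (pvTriple w.toList), 1 ≤ t.1 := by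
    intro t ht
    rw [List.mem_map] at ht
    obtain ⟨y, hy, rfl⟩ := ht
    have := pvMem_positions.mp hy
    simp only [pvTriple]
    omega
  have hinj : ∀ a ∈ (pvPositions (PySem.Str.len w)).map (pvTriple w.toList),
      ∀ b ∈ (pvPositions (PySem.Str.len w)).map (pvTriple w.toList), pvEnc a = pvEnc b → a = b :=
    fun a ha b hb h => pvEnc_inj (hTpos a ha) (hTpos b hb) h
  -- the pairs list of A is the encoded triple list
  have hpairs : (PySem.List.pyRange 0 (PySem.Str.len w) 1).flatMap (fun c1 =>
      (PySem.List.pyRange (c1 + 1) (PySem.Str.len w) 1).map (fun c2 => pvDistPair w.toList c1 c2))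
      = ((pvPositions (PySem.Str.len w)).map (pvTriple w.toList)).map pvEnc := by
    rw [List.map_map, pvPositions, List.map_flatMap]
    apply List.flatMap_congr
    intro c1 _
    rw [List.map_map]
    rfl
  -- A in normal form
  have hA : s_k_p1_py w = PySem.Set.ofList
      ((PySem.Set.ofList ((pvPositions (PySem.Str.len w)).map (pvTriple w.toList))).flatMap
        (fun t => (PySem.List.pyRange 0
            ((((pvPositions (PySem.Str.len w)).map (pvTriple w.toList)).count t : Int)) 1).map
          (fun c => PySem.Int.toStr (c + 1) ++ ":" ++ pvEnc t))) := by
    unfold s_k_p1_py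
    simp only []
    rw [pvDictA_eq_counter, PySem.Dict.keys_counter, hpairs,
      pvOfList_map pvEnc _ hinj, List.flatMap_map]
    refine congrArg PySem.Set.ofList (List.flatMap_congr ?_)
    intro t ht
    have htT : t ∈ (pvPositions (PySem.Str.len w)).map (pvTriple w.toList) :=
      (PySem.Set.mem_ofList _ _).mp ht
    rw [PySem.Dict.getD_counter, pvCount_map pvEnc _ t hinj htT]
  -- B in normal form
  have hB : s_k_p1_py_alt w = PySem.Set.ofList
      ((PySem.Set.ofList ((pvPositions (PySem.Str.len w)).map (pvTriple w.toList))).flatMap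
        (fun t => (PySem.List.pyRange 0
            ((((pvPositions (PySem.Str.len w)).map (pvTriple w.toList)).count t : Int)) 1).map
          (fun c => PySem.Int.toStr (c + 1) ++ ":" ++ pvEnc t))) := by
    -- the nested loop is a fold over the position list
    have h1 : s_k_p1_py_alt w = (pvPositions (PySem.Str.len w)).foldl
        (fun result x =>
          if (PySem.List.pyRange 0 x.1 1).any (fun i =>
                PySem.List.pyGetD w.toList i ' ' == PySem.List.pyGetD w.toList x.1 ' ' &&
                PySem.List.pyGetD w.toList (i + (x.2 - x.1)) ' ' == PySem.List.pyGetD w.toList x.2 ' ') then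
            result
          else
            (PySem.List.pyRange 1 (((PySem.List.pyRange 0 (PySem.Str.len w - (x.2 - x.1)) 1).foldl
                (fun acc i =>
                  if PySem.List.pyGetD w.toList i ' ' == PySem.List.pyGetD w.toList x.1 ' ' &&
                     PySem.List.pyGetD w.toList (i + (x.2 - x.1)) ' ' == PySem.List.pyGetD w.toList x.2 ' '
                  then acc + 1 else acc) 0) + 1) 1).foldl
              (fun r k => PySem.Set.add r (PySem.Int.toStr k ++ ":" ++ pvDistPair w.toList x.1 x.2)) result)
        PySem.Set.empty := by
      rw [pvPositions, List.foldl_flatMap]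
      simp only [List.foldl_map]
      rfl
    rw [h1]
    -- each step is one set-update
    have hstep : ∀ (acc : PySem.Set String) (x : Int × Int), x ∈ pvPositions (PySem.Str.len w) →
        (if (PySem.List.pyRange 0 x.1 1).any (fun i =>
              PySem.List.pyGetD w.toList i ' ' == PySem.List.pyGetD w.toList x.1 ' ' &&
              PySem.List.pyGetD w.toList (i + (x.2 - x.1)) ' ' == PySem.List.pyGetD w.toList x.2 ' ') then
          acc
        else
          (PySem.List.pyRange 1 (((PySem.List.pyRange 0 (PySem.Str.len w - (x.2 - x.1)) 1).foldl
              (fun acc i =>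
                if PySem.List.pyGetD w.toList i ' ' == PySem.List.pyGetD w.toList x.1 ' ' &&
                   PySem.List.pyGetD w.toList (i + (x.2 - x.1)) ' ' == PySem.List.pyGetD w.toList x.2 ' '
                then acc + 1 else acc) 0) + 1) 1).foldl
            (fun r k => PySem.Set.add r (PySem.Int.toStr k ++ ":" ++ pvDistPair w.toList x.1 x.2)) acc)
        = PySem.Set.update acc
          (if (PySem.List.pyRange 0 x.1 1).any (fun i =>
                PySem.List.pyGetD w.toList i ' ' == PySem.List.pyGetD w.toList x.1 ' ' &&
                PySem.List.pyGetD w.toList (i + (x.2 - x.1)) ' ' == PySem.List.pyGetD w.toList x.2 ' ') then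
            []
          else
            (PySem.List.pyRange 1 (((PySem.List.pyRange 0 (PySem.Str.len w - (x.2 - x.1)) 1).foldl
                (fun acc i =>
                  if PySem.List.pyGetD w.toList i ' ' == PySem.List.pyGetD w.toList x.1 ' ' &&
                     PySem.List.pyGetD w.toList (i + (x.2 - x.1)) ' ' == PySem.List.pyGetD w.toList x.2 ' '
                  then acc + 1 else acc) 0) + 1) 1).map
              (fun k => PySem.Int.toStr k ++ ":" ++ pvDistPair w.toList x.1 x.2)) := by
      intro acc x _
      by_cases h : (PySem.List.pyRange 0 x.1 1).any (fun i =>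
          PySem.List.pyGetD w.toList i ' ' == PySem.List.pyGetD w.toList x.1 ' ' &&
          PySem.List.pyGetD w.toList (i + (x.2 - x.1)) ' ' == PySem.List.pyGetD w.toList x.2 ' ') = true
      · rw [if_pos h, if_pos h, PySem.Set.update_nil]
      · rw [if_neg h, if_neg h, PySem.Set.update_map_eq_foldl_add]
    refine Eq.trans (PySem.List.foldl_congr_mem _ _ _ _ hstep) ?_
    rw [pvFoldUpdate]
    rw [PySem.Set.update_empty]
    -- rewrite the per-position emission through the triple's multiplicity
    have hG : ∀ x ∈ pvPositions (PySem.Str.len w),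
        (if (PySem.List.pyRange 0 x.1 1).any (fun i =>
              PySem.List.pyGetD w.toList i ' ' == PySem.List.pyGetD w.toList x.1 ' ' &&
              PySem.List.pyGetD w.toList (i + (x.2 - x.1)) ' ' == PySem.List.pyGetD w.toList x.2 ' ') then
          ([] : List String)
        else
          (PySem.List.pyRange 1 (((PySem.List.pyRange 0 (PySem.Str.len w - (x.2 - x.1)) 1).foldl
              (fun acc i =>
                if PySem.List.pyGetD w.toList i ' ' == PySem.List.pyGetD w.toList x.1 ' ' &&
                   PySem.List.pyGetD w.toList (i + (x.2 - x.1)) ' ' == PySem.List.pyGetD w.toList x.2 ' '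
                then acc + 1 else acc) 0) + 1) 1).map
            (fun k => PySem.Int.toStr k ++ ":" ++ pvDistPair w.toList x.1 x.2))
        = (if (PySem.List.pyRange 0 x.1 1).any (fun i =>
              PySem.List.pyGetD w.toList i ' ' == PySem.List.pyGetD w.toList x.1 ' ' &&
              PySem.List.pyGetD w.toList (i + (x.2 - x.1)) ' ' == PySem.List.pyGetD w.toList x.2 ' ') then
          []
        else
          (PySem.List.pyRange 1
              ((((pvPositions (PySem.Str.len w)).map (pvTriple w.toList)).count (pvTriple w.toList x) : Int) + 1) 1).map
            (fun k => PySem.Int.toStr k ++ ":" ++ pvEnc (pvTriple w.toList x))) := by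
      intro x hx
      have hbx := pvMem_positions.mp hx
      have hm : (PySem.List.pyRange 0 (PySem.Str.len w - (x.2 - x.1)) 1).foldl
          (fun acc i =>
            if PySem.List.pyGetD w.toList i ' ' == PySem.List.pyGetD w.toList x.1 ' ' &&
               PySem.List.pyGetD w.toList (i + (x.2 - x.1)) ' ' == PySem.List.pyGetD w.toList x.2 ' '
            then acc + 1 else acc) 0
          = (((pvPositions (PySem.Str.len w)).map (pvTriple w.toList)).count (pvTriple w.toList x) : Int) := by
        rw [PySem.List.foldl_if_add_one]
        rw [pvM_eq w.toList (PySem.Str.len w) x.1 x.2 hbx.1 hbx.2.1 hbx.2.2]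
        simp
      rw [hm]
      rfl
    refine Eq.trans (congrArg PySem.Set.ofList (List.flatMap_congr hG)) ?_
    -- the guarded flatMap is the first-occurrence emission over the triples
    refine Eq.trans (congrArg PySem.Set.ofList (pvFlatMap_firstOcc (pvTriple w.toList)
        (fun x => (PySem.List.pyRange 0 x.1 1).any (fun i =>
            PySem.List.pyGetD w.toList i ' ' == PySem.List.pyGetD w.toList x.1 ' ' &&
            PySem.List.pyGetD w.toList (i + (x.2 - x.1)) ' ' == PySem.List.pyGetD w.toList x.2 ' '))
        (fun t => (PySem.List.pyRange 1
            ((((pvPositions (PySem.Str.len w)).map (pvTriple w.toList)).count t : Int) + 1) 1).map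
          (fun k => PySem.Int.toStr k ++ ":" ++ pvEnc t))
        (pvPositions (PySem.Str.len w)) (pvCond_iff w.toList (PySem.Str.len w))
        (pvPositions (PySem.Str.len w)) [] rfl)) ?_
    rw [pvEmitAux_eq]
    simp only [List.map_nil, List.contains_nil, Bool.not_false, List.filter_true]
    refine congrArg PySem.Set.ofList (List.flatMap_congr ?_)
    intro t _
    exact pvExpand_eq (pvEnc t) _
  rw [hA, hB]
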